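-- pv_equiv track=rewrite | github.com/Shinechaote/anki-chess | run-2.py | getFenForBoard
-- ===== SOURCE A (Python) =====
-- def getFenForBoard(board):
-- 	fen = ""
-- 	for row in board:
-- 		counter = 0
-- 		for char in row:
-- 			if(char == "0" or char == "Z"):
-- 				counter += 1
-- 			else:
-- 				if(counter != 0):
-- 					fen += str(counter)
-- 				if(char == "J"):
-- 					fen += "K"
-- 				elif(char == "j"):
-- 					fen += "k"
-- 				elif(char == "S"):
-- 					fen += "R"
-- 				elif(char == "s"):
-- 					fen += "r"
-- 				elif(char == "A"):
-- 					fen += "B"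
-- 				elif(char == "M"):
-- 					fen += "N"
-- 				elif(char == "m"):
-- 					fen += "n"
-- 				elif(char == "a"):
-- 					fen += "b"
-- 				elif(char == "o"):
-- 					fen += "p"
-- 				elif(char == "O"):
-- 					fen += "P"
-- 				else:
-- 					fen += char
-- 				counter = 0
-- 		if(counter != 0):
-- 			fen += str(counter)
-- 		fen += "/"
-- 	return fen[:-1]
-- ===== SOURCE B (Python) =====
-- def getFenForBoard(board):
--     piece = {'J': 'K', 'j': 'k', 'S': 'R', 's': 'r', 'A': 'B',
--              'M': 'N', 'm': 'n', 'a': 'b', 'o': 'p', 'O': 'P'}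
--
--     def is_empty(c):
--         return c == '0' or c == 'Z'
--
--     def row_fen(chars):
--         # run-length recursion over the row: a maximal run of empty squares
--         # becomes its decimal length, anything else is translated one char at a time
--         if not chars:
--             return ''
--         if is_empty(chars[0]):
--             run = 1
--             while run < len(chars) and is_empty(chars[run]):
--                 run += 1
--             return str(run) + row_fen(chars[run:])
--         return piece.get(chars[0], chars[0]) + row_fen(chars[1:])
--
--     return '/'.join(row_fen(list(row)) for row in board)
-- ===== Notes on version B (the rewrite author's own statement) =====
-- stated objective: idiomatic
-- what changed: A threads one mutable fen string and a pending-empty counter through every character and strips a trailing '/' at the end; B maps each row independently to its FEN via a run-length recursion (a maximal run of empty squares becomes its decimal length, other chars go through a piece-translation dict) and '/'-joins the row strings.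
import Mathlib
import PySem

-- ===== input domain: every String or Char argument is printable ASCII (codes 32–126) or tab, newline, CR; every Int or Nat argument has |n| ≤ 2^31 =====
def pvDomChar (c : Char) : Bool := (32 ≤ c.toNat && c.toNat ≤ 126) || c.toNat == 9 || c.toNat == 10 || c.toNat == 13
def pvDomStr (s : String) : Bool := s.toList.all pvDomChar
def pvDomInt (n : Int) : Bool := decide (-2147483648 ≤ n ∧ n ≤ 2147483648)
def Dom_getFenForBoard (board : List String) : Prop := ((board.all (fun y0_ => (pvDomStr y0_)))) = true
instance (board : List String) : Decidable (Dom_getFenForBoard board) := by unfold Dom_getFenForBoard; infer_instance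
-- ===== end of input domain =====

-- B replaces A's running-counter state machine (one mutable fen + counter threaded
-- through every char, trailing '/' stripped at the end) by a per-row run-length
-- recursion with a piece-translation dict, joined with '/' (objective: idiomatic).


-- ===== PORT A =====
-- inner loop body: state (fen, counter), one character
def pvStepA (st : List Char × Int) (char : Char) : List Char × Int :=
  if char == '0' || char == 'Z' then (st.1, st.2 + 1)
  else
    let fen := if st.2 ≠ 0 then st.1 ++ PySem.Int.toChars st.2 else st.1
    let fen :=
      if char == 'J' then fen ++ ['K']
      else if char == 'j' then fen ++ ['k']
      else if char == 'S' then fen ++ ['R']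
      else if char == 's' then fen ++ ['r']
      else if char == 'A' then fen ++ ['B']
      else if char == 'M' then fen ++ ['N']
      else if char == 'm' then fen ++ ['n']
      else if char == 'a' then fen ++ ['b']
      else if char == 'o' then fen ++ ['p']
      else if char == 'O' then fen ++ ['P']
      else fen ++ [char]
    (fen, 0)

-- one row: run the char loop from counter 0, flush the counter, append '/'
def pvRowA (fen : List Char) (row : List Char) : List Char :=
  let st := row.foldl pvStepA (fen, (0 : Int))
  (if st.2 ≠ 0 then st.1 ++ PySem.Int.toChars st.2 else st.1) ++ ['/']

def getFenForBoard (board : List String) : String :=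
  let fen := board.foldl (fun fen row => pvRowA fen row.toList) ([] : List Char)
  String.ofList (PySem.List.slice fen none (some (-1)))   -- fen[:-1]

-- ===== PORT B =====
def pvIsEmptySq (c : Char) : Bool := c == '0' || c == 'Z'

def pvPiece : PySem.Dict Char Char :=
  PySem.Dict.ofList [('J', 'K'), ('j', 'k'), ('S', 'R'), ('s', 'r'), ('A', 'B'),
                     ('M', 'N'), ('m', 'n'), ('a', 'b'), ('o', 'p'), ('O', 'P')]

-- row_fen: a maximal run of empty squares becomes its decimal length,
-- anything else is translated one char at a time via the dict
def pvRowFenB : List Char → List Char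
  | [] => []
  | c :: cs =>
    if pvIsEmptySq c then
      let run : Nat := 1 + (cs.takeWhile pvIsEmptySq).length
      PySem.Int.toChars (run : Int) ++ pvRowFenB (cs.dropWhile pvIsEmptySq)
    else pvPiece.getD c c :: pvRowFenB cs
  termination_by cs => cs.length
  decreasing_by
  · simpa using Nat.lt_succ_of_le (List.length_dropWhile_le pvIsEmptySq cs)
  · simp

def getFenForBoard_alt (board : List String) : String :=
  String.ofList (PySem.Chars.join ['/'] (board.map (fun row => pvRowFenB row.toList)))

-- ===== PRECONDITION & SPEC =====
def Spec_getFenForBoard (board : List String) (out : String) : Prop := out = getFenForBoard_alt board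
instance (board : List String) (out : String) : Decidable (Spec_getFenForBoard board out) := by unfold Spec_getFenForBoard; infer_instance

-- ===== CLAIM (what is proved, stated in full; the proofs are below) =====
def Claim_equal_getFenForBoard : Prop := ∀ (board : List String), Dom_getFenForBoard board → Spec_getFenForBoard board (getFenForBoard board)

-- ===== LEMMAS AND PROOFS =====

-- abstract description of A's inner loop output for pending counter cnt
def pvG (cnt : Nat) : List Char → List Char
  | [] => if cnt ≠ 0 then PySem.Int.toChars (cnt : Int) else []
  | c :: cs =>
    if pvIsEmptySq c then pvG (cnt + 1) cs
    else (if cnt ≠ 0 then PySem.Int.toChars (cnt : Int) else []) ++ [pvPiece.getD c c] ++ pvG 0 cs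

-- A's translation chain equals the dict lookup with default
lemma pvTrans_eq (fen : List Char) (c : Char) :
    (if c == 'J' then fen ++ ['K']
     else if c == 'j' then fen ++ ['k']
     else if c == 'S' then fen ++ ['R']
     else if c == 's' then fen ++ ['r']
     else if c == 'A' then fen ++ ['B']
     else if c == 'M' then fen ++ ['N']
     else if c == 'm' then fen ++ ['n']
     else if c == 'a' then fen ++ ['b']
     else if c == 'o' then fen ++ ['p']
     else if c == 'O' then fen ++ ['P']
     else fen ++ [c]) = fen ++ [pvPiece.getD c c] := by
  simp only [beq_iff_eq]
  split_ifs with h1 h2 h3 h4 h5 h6 h7 h8 h9 h10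
  · subst h1; congr 1
  · subst h2; congr 1
  · subst h3; congr 1
  · subst h4; congr 1
  · subst h5; congr 1
  · subst h6; congr 1
  · subst h7; congr 1
  · subst h8; congr 1
  · subst h9; congr 1
  · subst h10; congr 1
  · have hd : pvPiece = PySem.Dict.mk [('J', 'K'), ('j', 'k'), ('S', 'R'), ('s', 'r'), ('A', 'B'),
        ('M', 'N'), ('m', 'n'), ('a', 'b'), ('o', 'p'), ('O', 'P')] := by decide
    have hg : pvPiece.getD c c = c := by
      rw [hd]
      simp only [PySem.Dict.getD, PySem.Dict.get?_mk_cons, beq_iff_eq]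
      rw [if_neg (Ne.symm h1), if_neg (Ne.symm h2), if_neg (Ne.symm h3), if_neg (Ne.symm h4),
        if_neg (Ne.symm h5), if_neg (Ne.symm h6), if_neg (Ne.symm h7), if_neg (Ne.symm h8),
        if_neg (Ne.symm h9), if_neg (Ne.symm h10)]
      simp [PySem.Dict.get?]
    rw [hg]

-- A's inner loop (from any prefix fen, pending counter cnt) plus the flush is fen ++ pvG cnt
lemma pvLoopA_eq (cs : List Char) : ∀ (fen : List Char) (cnt : Nat),
    (if (cs.foldl pvStepA (fen, (cnt : Int))).2 ≠ 0 then
       (cs.foldl pvStepA (fen, (cnt : Int))).1 ++ PySem.Int.toChars (cs.foldl pvStepA (fen, (cnt : Int))).2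
     else (cs.foldl pvStepA (fen, (cnt : Int))).1) = fen ++ pvG cnt cs := by
  induction cs with
  | nil =>
    intro fen cnt
    simp [pvG]
    by_cases h : cnt = 0 <;> simp [h]
  | cons c cs ih =>
    intro fen cnt
    simp only [List.foldl_cons]
    by_cases he : pvIsEmptySq c
    · have : pvStepA (fen, (cnt : Int)) c = (fen, (cnt : Int) + 1) := by
        simp [pvStepA, pvIsEmptySq] at he ⊢; tauto
      rw [this]
      have : ((cnt : Int) + 1) = ((cnt + 1 : Nat) : Int) := by push_cast; ring
      rw [this, ih fen (cnt + 1)]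
      simp [pvG, he]
    · have hs : pvStepA (fen, (cnt : Int)) c =
          ((if cnt ≠ 0 then fen ++ PySem.Int.toChars (cnt : Int) else fen) ++ [pvPiece.getD c c],
           (0 : Int)) := by
        simp only [pvStepA, pvIsEmptySq] at he ⊢
        rw [if_neg (by simpa using he)]
        rw [pvTrans_eq]
        by_cases h : cnt = 0 <;> simp [h]
      rw [hs]
      have h2 := ih ((if cnt ≠ 0 then fen ++ PySem.Int.toChars (cnt : Int) else fen) ++ [pvPiece.getD c c]) 0
      rw [Nat.cast_zero] at h2
      rw [h2]
      simp [pvG, he]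
      by_cases h : cnt = 0 <;> simp [h]

lemma pvRowA_eq (fen row : List Char) : pvRowA fen row = fen ++ pvG 0 row ++ ['/'] := by
  have h := pvLoopA_eq row fen 0
  rw [Nat.cast_zero] at h
  simp only [pvRowA]
  rw [h]

-- the outer fold accumulates fen ++ concatenation of (row fen ++ '/')
lemma pvFoldA_eq (board : List String) : ∀ (fen : List Char),
    board.foldl (fun fen row => pvRowA fen row.toList) fen
      = fen ++ board.flatMap (fun row => pvG 0 row.toList ++ ['/']) := by
  induction board with
  | nil => intro fen; simp
  | cons r rs ih =>
    intro fen
    rw [List.foldl_cons, ih, pvRowA_eq, List.flatMap_cons]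
    simp [List.append_assoc]

-- dropping the trailing '/' of the flatMap is the '/'-join of the rows
lemma pvJoin_eq (l : List (List Char)) :
    (l.flatMap (fun x => x ++ ['/'])).dropLast = PySem.Chars.join ['/'] l := by
  induction l with
  | nil => simp [PySem.Chars.join_nil]
  | cons x xs ih =>
    cases xs with
    | nil => simp [PySem.Chars.join_singleton]
    | cons y ys =>
      simp only [List.flatMap_cons] at ih ⊢
      rw [List.dropLast_append_of_ne_nil (by simp), ih, PySem.Chars.join_cons_cons]

-- a run of empty squares is absorbed into the pending counter
lemma pvG_run (run : List Char) : ∀ (cnt : Nat) (cs : List Char),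
    (∀ c ∈ run, pvIsEmptySq c = true) → pvG cnt (run ++ cs) = pvG (cnt + run.length) cs := by
  induction run with
  | nil => intro cnt cs _; simp
  | cons c rs ih =>
    intro cnt cs h
    have hc := h c (by simp)
    simp only [List.cons_append, pvG, hc, if_pos]
    rw [ih (cnt + 1) cs (fun d hd => h d (by simp [hd]))]
    congr 1
    simp only [List.length_cons]
    omega

-- when the next char is not empty (or the row ends), the pending counter flushes
lemma pvG_flush (cnt : Nat) (cs : List Char)
    (h : cs = [] ∨ ∃ d ds, cs = d :: ds ∧ pvIsEmptySq d = false) :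
    pvG cnt cs = (if cnt ≠ 0 then PySem.Int.toChars (cnt : Int) else []) ++ pvG 0 cs := by
  rcases h with h | ⟨d, ds, rfl, hd⟩
  · subst h; simp [pvG]
  · simp [pvG, hd]

lemma pvG_eq_rowFenB (cs : List Char) : pvG 0 cs = pvRowFenB cs := by
  induction cs using pvRowFenB.induct with
  | case1 => simp [pvG, pvRowFenB]
  | case2 c cs he ih =>
    have hsplit : c :: cs = (c :: cs.takeWhile pvIsEmptySq) ++ cs.dropWhile pvIsEmptySq := by
      simp [List.takeWhile_append_dropWhile]
    rw [hsplit, pvG_run _ 0 _ (by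
      intro d hd
      rcases List.mem_cons.mp hd with rfl | hd
      · exact he
      · exact List.mem_takeWhile_imp hd)]
    rw [pvG_flush _ _ (by
      rcases hdw : cs.dropWhile pvIsEmptySq with _ | ⟨d, ds⟩
      · exact Or.inl rfl
      · refine Or.inr ⟨d, ds, rfl, ?_⟩
        have h1 := List.head_dropWhile_not pvIsEmptySq (l := cs) (by simp [hdw])
        simpa [hdw] using h1)]
    rw [ih]
    simp [pvRowFenB, he, Nat.add_comm]
  | case3 c cs he ih =>
    simp [pvG, pvRowFenB, he, ih]

-- ===== VERDICT (by name: the statement is the Claim_ definition above) =====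
theorem getFenForBoard_spec : Claim_equal_getFenForBoard := by
  intro board _
  unfold Spec_getFenForBoard getFenForBoard getFenForBoard_alt
  simp only [pvFoldA_eq board, PySem.List.slice_to_neg_one, List.nil_append]
  have : (board.flatMap (fun row => pvG 0 row.toList ++ ['/']))
       = (board.map (fun row => pvRowFenB row.toList)).flatMap (fun x => x ++ ['/']) := by
    simp only [List.flatMap_map]
    exact List.flatMap_congr (fun r _ => by rw [pvG_eq_rowFenB])
  rw [this, pvJoin_eq]
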